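-- pv_equiv track=rewrite | github.com/dinhlong1/BaiTap | mangsonguyen.py | odd_sort_perfect_numbers_but_other_values_stay_the_same
-- ===== SOURCE A (Python) =====
-- def is_perfect_number(target_number):
--     Sum = 0
--     for i in range(1,target_number):
--         if target_number % i == 0:
--             Sum = Sum + i
--     if Sum == target_number:
--         return True
--     else:
--         return False
--
-- def odd_sort_perfect_numbers_but_other_values_stay_the_same(list):
--     for i in range(len(list) -1 , -1 ,-1):
--         if is_perfect_number(list[i]) == True:
--             for t in range(i -1,-1 ,-1 ):
--                 if is_perfect_number(list[t]) == True and list[t] < list[i]: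
--
--                     temp = list[i]
--                     list[i] = list[t]
--                     list[t] = temp
--     return list
-- ===== SOURCE B (Python) =====
-- # B: O(sqrt(v)) divisor-pair perfect check, compute each element's perfectness once,
-- # sort the perfect values descending in one pass and write them back in place.
-- # (Mutates the argument in place, like A; equivalence is about the return value.)
-- def _is_perfect(n):
--     s, i = 0, 1
--     while i * i <= n:
--         if n % i == 0:
--             if i < n:
--                 s += i
--             j = n // i
--             if j != i and j < n:
--                 s += j
--         i += 1
--     return s == n
--
-- def odd_sort_perfect_numbers_but_other_values_stay_the_same(list):
--     vals = sorted((v for v in list if _is_perfect(v)), reverse=True)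
--     it = iter(vals)
--     for k, v in enumerate(list):
--         if _is_perfect(v):
--             list[k] = next(it)
--     return list
-- ===== Notes on version B (the rewrite author's own statement) =====
-- stated objective: faster
-- what changed: Replaces the O(v)-per-call trial-division perfect test and the quadratic in-place selection-swap passes with an O(sqrt v) divisor-pair check computed once per element, one descending sort of the perfect values and a single write-back pass.
import Mathlib
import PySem

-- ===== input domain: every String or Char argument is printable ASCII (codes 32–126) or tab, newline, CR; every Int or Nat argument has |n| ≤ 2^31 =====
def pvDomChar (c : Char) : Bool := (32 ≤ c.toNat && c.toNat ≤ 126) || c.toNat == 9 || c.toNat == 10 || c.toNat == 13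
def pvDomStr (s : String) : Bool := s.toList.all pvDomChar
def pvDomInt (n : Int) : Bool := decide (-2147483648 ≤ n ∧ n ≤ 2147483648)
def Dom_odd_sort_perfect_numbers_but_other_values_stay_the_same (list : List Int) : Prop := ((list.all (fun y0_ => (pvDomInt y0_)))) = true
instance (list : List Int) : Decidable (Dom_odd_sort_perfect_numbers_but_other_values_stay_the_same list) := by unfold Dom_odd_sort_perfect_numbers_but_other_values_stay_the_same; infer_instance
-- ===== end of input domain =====

-- B replaces A's O(v)-per-call trial-division perfect-number test and quadratic in-place
-- selection-swap pass by an O(sqrt v) divisor-pair check per element, one descending sort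
-- of the perfect values and a single write-back pass. Both Pythons mutate the argument
-- list in place; the equivalence proved here is about the return value.


-- ===== PORT A =====
-- is_perfect_number: trial division over range(1, n), summing the divisors
def isPerfA (n : Int) : Bool :=
  ((PySem.List.pyRange 1 n 1).foldl
    (fun S i => if PySem.Int.mod n i == 0 then S + i else S) 0) == n

-- body of the inner 'for t in range(i-1, -1, -1)' loop (i is the outer index;
-- the indices produced by the ranges are always in bounds, so pyGetD/pySetD are exact)
def istep (i : Int) (l : List Int) (t : Int) : List Int :=
  if isPerfA (PySem.List.pyGetD l t 0) && decide (PySem.List.pyGetD l t 0 < PySem.List.pyGetD l i 0) then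
    let temp := PySem.List.pyGetD l i 0
    PySem.List.pySetD (PySem.List.pySetD l i (PySem.List.pyGetD l t 0)) t temp
  else l

-- body of the outer 'for i in range(len(list)-1, -1, -1)' loop
def ostep (l : List Int) (i : Int) : List Int :=
  if isPerfA (PySem.List.pyGetD l i 0) then
    (PySem.List.pyRange (i - 1) (-1) (-1)).foldl (istep i) l
  else l

def odd_sort_perfect_numbers_but_other_values_stay_the_same (list : List Int) : List Int :=
  (PySem.List.pyRange ((list.length : Int) - 1) (-1) (-1)).foldl ostep list

-- ===== PORT B =====
-- _is_perfect: while i*i <= n, pairing each divisor i with n//i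
def altLoop (n i s : Int) : Int :=
  if h : i * i ≤ n then
    altLoop n (i + 1)
      (if PySem.Int.mod n i == 0 then
        (let s1 := if i < n then s + i else s
         let j := PySem.Int.floordiv n i
         if j ≠ i ∧ j < n then s1 + j else s1)
      else s)
  else s
termination_by (n + 1 - i).toNat
decreasing_by
  have h2 : 0 ≤ n := le_trans (mul_self_nonneg i) h
  have h1 : 2 * i ≤ n + 1 := by nlinarith [sq_nonneg (i - 1)]
  omega

def isPerfAlt (n : Int) : Bool := altLoop n 1 0 == n

-- the 'for k, v in enumerate(list): if _is_perfect(v): list[k] = next(it)' loop,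
-- with vs the not-yet-consumed part of the vals iterator
def writeBack : List Int → List Int → List Int
  | [], _ => []
  | x :: r, vs =>
    if isPerfAlt x then
      match vs with
      | v :: vs' => v :: writeBack r vs'
      | [] => x :: writeBack r []   -- unreachable: vals has one value per perfect element
    else x :: writeBack r vs

def odd_sort_perfect_numbers_but_other_values_stay_the_same_alt (list : List Int) : List Int :=
  let vals := PySem.List.sorted (list.filter (fun v => isPerfAlt v)) (fun x => x) true
  writeBack list vals

-- ===== PRECONDITION & SPEC =====
def Spec_odd_sort_perfect_numbers_but_other_values_stay_the_same (list : List Int) (out : List Int) : Prop := out = odd_sort_perfect_numbers_but_other_values_stay_the_same_alt list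
instance (list : List Int) (out : List Int) : Decidable (Spec_odd_sort_perfect_numbers_but_other_values_stay_the_same list out) := by unfold Spec_odd_sort_perfect_numbers_but_other_values_stay_the_same; infer_instance

-- ===== CLAIM (what is proved, stated in full; the proofs are below) =====
def Claim_equal_odd_sort_perfect_numbers_but_other_values_stay_the_same : Prop := ∀ (list : List Int), Dom_odd_sort_perfect_numbers_but_other_values_stay_the_same list → Spec_odd_sort_perfect_numbers_but_other_values_stay_the_same list (odd_sort_perfect_numbers_but_other_values_stay_the_same list)

-- ===== LEMMAS AND PROOFS =====

-- ---- Part 1: the two perfect-number tests agree on every integer ----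
-- A sums the proper divisors by trial division over [1, n); B pairs each divisor
-- i ≤ √n with n/i.  Both equal the proper-divisor sum of n.toNat (0 for n ≤ 1).

theorem mod_cast_pos (n i : ℤ) (hn : 0 ≤ n) (hi : 1 ≤ i) :
    PySem.Int.mod n i = ((n.toNat % i.toNat : ℕ) : ℤ) := by
  show n.fmod i = _
  rw [Int.fmod_eq_emod]
  simp only [if_pos (Or.inl (by omega : (0:ℤ) ≤ i)), add_zero]
  push_cast [Int.toNat_of_nonneg hn, Int.toNat_of_nonneg (by omega : (0:ℤ) ≤ i)]
  rfl

theorem div_cast_pos (n i : ℤ) (hn : 0 ≤ n) (hi : 1 ≤ i) :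
    PySem.Int.floordiv n i = ((n.toNat / i.toNat : ℕ) : ℤ) := by
  show n.fdiv i = _
  rw [Int.fdiv_eq_ediv]
  rw [if_pos (Or.inl (by omega : (0:ℤ) ≤ i)), sub_zero]
  push_cast [Int.toNat_of_nonneg hn, Int.toNat_of_nonneg (by omega : (0:ℤ) ≤ i)]
  rfl

def gN (N i : ℕ) : ℤ :=
  if N % i = 0 then
    ((if i < N then (i:ℤ) else 0) + (if N/i ≠ i ∧ N/i < N then ((N/i : ℕ):ℤ) else 0))
  else 0

theorem altLoop_sum (n : ℤ) (hn : 0 ≤ n) : ∀ i s : ℤ, 1 ≤ i →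
    altLoop n i s = s + ∑ k ∈ Finset.Icc i.toNat n.toNat.sqrt, gN n.toNat k := by
  intro i s hi
  generalize hf : (n + 1 - i).toNat = f
  induction f using Nat.strong_induction_on generalizing i s with
  | _ f ih =>
  rw [altLoop]
  by_cases hc : i * i ≤ n
  · rw [dif_pos hc]
    have hii : ((i.toNat * i.toNat : ℕ) : ℤ) ≤ (n.toNat : ℤ) := by
      push_cast [Int.toNat_of_nonneg hn, Int.toNat_of_nonneg (by omega : (0:ℤ) ≤ i)]
      exact hc
    have hsq : i.toNat ≤ n.toNat.sqrt := Nat.le_sqrt.mpr (by exact_mod_cast hii)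
    have hsplit : Finset.Icc i.toNat n.toNat.sqrt
        = insert i.toNat (Finset.Icc (i.toNat + 1) n.toNat.sqrt) := by
      ext x; simp [Finset.mem_Icc]; omega
    have hnotmem : i.toNat ∉ Finset.Icc (i.toNat + 1) n.toNat.sqrt := by
      simp [Finset.mem_Icc]
    rw [hsplit, Finset.sum_insert hnotmem]
    have hin : i ≤ n := by nlinarith
    have hbody : (if PySem.Int.mod n i == 0 then
        (let s1 := if i < n then s + i else s
         let j := PySem.Int.floordiv n i
         if j ≠ i ∧ j < n then s1 + j else s1)
      else s) = s + gN n.toNat i.toNat := by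
      rw [mod_cast_pos n i hn hi, div_cast_pos n i hn hi]
      have hieq : ((i.toNat : ℕ) : ℤ) = i := Int.toNat_of_nonneg (by omega)
      have hneq : ((n.toNat : ℕ) : ℤ) = n := Int.toNat_of_nonneg hn
      unfold gN
      by_cases hm : n.toNat % i.toNat = 0
      · rw [hm]
        simp only [Nat.cast_zero, beq_self_eq_true, if_true]
        generalize n.toNat / i.toNat = q
        split_ifs <;> omega
      · have hb : (((n.toNat % i.toNat : ℕ) : ℤ) == 0) = false := by
          rw [beq_eq_false_iff_ne]
          exact_mod_cast hm
        rw [hb, if_neg hm]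
        simp
    rw [hbody]
    have hstep := ih (n + 1 - (i + 1)).toNat (by omega) (i + 1) (s + gN n.toNat i.toNat) (by omega) rfl
    rw [hstep]
    have : (i + 1).toNat = i.toNat + 1 := by omega
    rw [this]
    ring
  · rw [dif_neg hc]
    have hgt : n.toNat < i.toNat * i.toNat := by
      have : n < i * i := by omega
      have h2 : ((i.toNat * i.toNat : ℕ) : ℤ) = i * i := by
        push_cast [Int.toNat_of_nonneg (by omega : (0:ℤ) ≤ i)]; ring
      omega
    have hsq : n.toNat.sqrt < i.toNat := Nat.sqrt_lt.mpr hgt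
    rw [show Finset.Icc i.toNat n.toNat.sqrt = ∅ by
      ext x; simp [Finset.mem_Icc]; omega]
    simp

theorem foldl_if_add (l : List Int) (c : Int → Bool) (init : Int) :
    l.foldl (fun S i => if c i then S + i else S) init = init + (l.filter c).sum := by
  induction l generalizing init with
  | nil => simp
  | cons x l ih =>
    rw [List.foldl_cons, List.filter_cons]
    by_cases h : c x
    · rw [if_pos h, ih]; simp [h]; ring
    · rw [if_neg h, ih]; simp [h]

theorem filter_sum_eq (l : List Int) (c : Int → Bool) :
    (l.filter c).sum = (l.map (fun x => if c x then x else 0)).sum := by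
  induction l with
  | nil => rfl
  | cons x l ih =>
    rw [List.filter_cons]
    by_cases h : c x <;> simp [h, ih]

theorem range_list_sum (m : ℕ) (f : ℕ → ℤ) :
    ((List.range m).map f).sum = ∑ i ∈ Finset.range m, f i := by
  induction m with
  | zero => simp
  | succ m ih => rw [Finset.sum_range_succ, List.range_succ]; simp [ih]

theorem sumA_eq (n : ℤ) (hn : 2 ≤ n) :
    (PySem.List.pyRange 1 n 1).foldl
      (fun S i => if PySem.Int.mod n i == 0 then S + i else S) 0
    = ∑ d ∈ n.toNat.properDivisors, (d:ℤ) := by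
  rw [foldl_if_add, filter_sum_eq, PySem.List.pyRange_one, List.map_map, range_list_sum]
  have h1 : ∀ k : ℕ, ((fun x => if (PySem.Int.mod n x == 0) then x else 0) ∘ fun k : ℕ => (1:ℤ) + ↑k) k
      = (fun d : ℕ => if n.toNat % d = 0 then (d:ℤ) else 0) (1 + k) := by
    intro k
    simp only [Function.comp_apply]
    rw [mod_cast_pos n (1 + (k:ℤ)) (by omega) (by omega)]
    have ht : ((1:ℤ) + (k:ℤ)).toNat = 1 + k := by omega
    rw [ht]
    by_cases hm : n.toNat % (1 + k) = 0
    · rw [hm]; simp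
    · have hb : (((n.toNat % (1 + k) : ℕ) : ℤ) == 0) = false := by
        rw [beq_eq_false_iff_ne]; exact_mod_cast hm
      rw [hb, if_neg hm]
      simp
  rw [Finset.sum_congr rfl (fun k _ => h1 k)]
  rw [show (n - 1).toNat = n.toNat - 1 by omega]
  rw [← Finset.sum_Ico_eq_sum_range (fun d => if n.toNat % d = 0 then (d:ℤ) else 0) 1 n.toNat]
  rw [← Finset.sum_filter]
  have hset : (Finset.Ico 1 n.toNat).filter (fun d => n.toNat % d = 0) = n.toNat.properDivisors := by
    ext d
    simp only [Finset.mem_filter, Finset.mem_Ico, Nat.mem_properDivisors]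
    constructor
    · rintro ⟨⟨h1d, h2d⟩, h3d⟩
      exact ⟨Nat.dvd_of_mod_eq_zero h3d, h2d⟩
    · rintro ⟨hdvd, hlt⟩
      have hd0 : d ≠ 0 := by
        rintro rfl
        have : n.toNat = 0 := Nat.eq_zero_of_zero_dvd hdvd
        omega
      exact ⟨⟨by omega, hlt⟩, Nat.dvd_iff_mod_eq_zero.mp hdvd⟩
  rw [hset]
  ring

theorem pairing (N : ℕ) (hN : 2 ≤ N) :
    ∑ d ∈ N.properDivisors, (d:ℤ) = ∑ i ∈ Finset.Icc 1 N.sqrt, gN N i := by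
  have hN0 : N ≠ 0 := by omega
  have hD : (Finset.Icc 1 N.sqrt).filter (fun i => N % i = 0)
      = N.divisors.filter (fun d => d * d ≤ N) := by
    ext i
    simp only [Finset.mem_filter, Finset.mem_Icc, Nat.mem_divisors]
    constructor
    · rintro ⟨⟨h1, h2⟩, h3⟩
      exact ⟨⟨Nat.dvd_of_mod_eq_zero h3, hN0⟩, Nat.le_sqrt.mp h2⟩
    · rintro ⟨⟨hdvd, _⟩, hsq⟩
      have hi0 : i ≠ 0 := by
        rintro rfl
        exact hN0 (Nat.eq_zero_of_zero_dvd hdvd)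
      exact ⟨⟨by omega, Nat.le_sqrt.mpr hsq⟩, Nat.dvd_iff_mod_eq_zero.mp hdvd⟩
  have hRHS : ∑ i ∈ Finset.Icc 1 N.sqrt, gN N i
      = ∑ d ∈ N.divisors.filter (fun d => d * d ≤ N),
          ((if d < N then (d:ℤ) else 0) + (if N / d ≠ d ∧ N / d < N then ((N / d : ℕ):ℤ) else 0)) := by
    rw [← hD, Finset.sum_filter]
    apply Finset.sum_congr rfl
    intro i _
    rfl
  rw [hRHS, Finset.sum_add_distrib, ← Finset.sum_filter, ← Finset.sum_filter]
  rw [← Finset.sum_filter_add_sum_filter_not N.properDivisors (fun d => d * d ≤ N) (fun d => (d:ℤ))]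
  have h1 : (N.divisors.filter (fun d => d * d ≤ N)).filter (fun d => d < N)
      = N.properDivisors.filter (fun d => d * d ≤ N) := by
    ext d
    simp only [Finset.mem_filter, Nat.mem_divisors, Nat.mem_properDivisors]
    tauto
  have h2 : ∑ d ∈ (N.divisors.filter (fun d => d * d ≤ N)).filter
        (fun d => N / d ≠ d ∧ N / d < N), ((N / d : ℕ):ℤ)
      = ∑ d ∈ N.properDivisors.filter (fun d => ¬ d * d ≤ N), (d:ℤ) := by
    apply Finset.sum_nbij' (i := fun d => N / d) (j := fun e => N / e)
    · intro d hd
      simp only [Finset.mem_filter, Nat.mem_divisors, Nat.mem_properDivisors] at hd ⊢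
      obtain ⟨⟨⟨hdvd, _⟩, hsq⟩, hne, hlt⟩ := hd
      have hd0 : 0 < d := by
        rcases Nat.eq_zero_or_pos d with rfl | h
        · exact absurd (Nat.eq_zero_of_zero_dvd hdvd) hN0
        · exact h
      have hmul : d * (N / d) = N := Nat.mul_div_cancel' hdvd
      have hle : d ≤ N / d := by
        by_contra hgt
        push_neg at hgt
        have : d * (N / d) < d * d := mul_lt_mul_of_pos_left hgt hd0
        omega
      have hstrict : d < N / d := lt_of_le_of_ne hle (Ne.symm hne)
      refine ⟨⟨Nat.div_dvd_of_dvd hdvd, hlt⟩, ?_⟩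
      intro hcon
      have hmul2 : (N / d) * d = N := by rw [mul_comm]; exact hmul
      have hle2 : (N / d) * (N / d) ≤ (N / d) * d := by rw [hmul2]; exact hcon
      have := Nat.le_of_mul_le_mul_left hle2 (by omega : 0 < N / d)
      omega
    · intro e he
      simp only [Finset.mem_filter, Nat.mem_divisors, Nat.mem_properDivisors] at he ⊢
      obtain ⟨⟨hdvd, hlt⟩, hsq⟩ := he
      push_neg at hsq
      have he0 : 0 < e := by
        rcases Nat.eq_zero_or_pos e with rfl | h
        · exact absurd (Nat.eq_zero_of_zero_dvd hdvd) hN0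
        · exact h
      have hmul : e * (N / e) = N := Nat.mul_div_cancel' hdvd
      have he1 : 1 < e := by
        by_contra hle1
        push_neg at hle1
        have : e = 1 := by omega
        subst this
        simp at hsq
        omega
      have hle : N / e ≤ e := by
        by_contra hgt
        push_neg at hgt
        have : e * e < e * (N / e) := mul_lt_mul_of_pos_left hgt he0
        omega
      refine ⟨⟨⟨Nat.div_dvd_of_dvd hdvd, hN0⟩, ?_⟩, ?_, ?_⟩
      · calc N / e * (N / e) ≤ N / e * e := Nat.mul_le_mul_left _ hle
          _ = N := by rw [mul_comm]; exact hmul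
      · rw [Nat.div_div_self hdvd hN0]
        intro hcon
        have hmul2 : e * e = N := by rw [← hcon] at hmul; exact hmul
        omega
      · rw [Nat.div_div_self hdvd hN0]
        exact hlt
    · intro d hd
      simp only [Finset.mem_filter, Nat.mem_divisors] at hd
      exact Nat.div_div_self hd.1.1.1 hN0
    · intro e he
      simp only [Finset.mem_filter, Nat.mem_properDivisors] at he
      exact Nat.div_div_self he.1.1 hN0
    · intro d _
      rfl
  rw [h1, h2]

theorem perfSum_eq (n : Int) :
    (PySem.List.pyRange 1 n 1).foldl
      (fun S i => if PySem.Int.mod n i == 0 then S + i else S) 0 = altLoop n 1 0 := by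
  by_cases h2 : 2 ≤ n
  · rw [sumA_eq n h2, pairing n.toNat (by omega)]
    rw [altLoop_sum n (by omega) 1 0 (by omega)]
    norm_num
  · by_cases h1 : n = 1
    · subst h1
      rw [PySem.List.pyRange_one_eq_nil (by omega)]
      rw [altLoop, dif_pos (by norm_num)]
      rw [show (PySem.Int.mod 1 1 == 0) = true from by decide]
      rw [altLoop, dif_neg (by norm_num)]
      norm_num
    · rw [PySem.List.pyRange_one_eq_nil (by omega)]
      rw [altLoop, dif_neg (by omega)]
      rfl

theorem perfEq : isPerfAlt = isPerfA := by
  funext n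
  simp only [isPerfAlt, isPerfA, perfSum_eq n]

-- ---- Part 2: structural model of A's index-based double loop ----
-- innerR/outerR run A's loops on the reversed list (head = the position scanned
-- first); embedR writes a value list into the perfect positions of a template.

theorem getD_mid (a : List Int) (b : List Int) (v d : Int) : (a ++ v :: b).getD a.length d = v := by
  induction a with
  | nil => rfl
  | cons x a ih => simpa using ih

theorem set_mid (a : List Int) (b : List Int) (v y : Int) : (a ++ v :: b).set a.length y = a ++ y :: b := by
  induction a with
  | nil => rfl
  | cons x a ih => simpa using ih

theorem istep_at (a₀ m b : List Int) (y v : Int) :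
    istep (((a₀.length + 1 + m.length : Nat)) : Int) ((a₀ ++ [y]) ++ m ++ v :: b) ((a₀.length : Nat) : Int)
    = if isPerfA y && decide (y < v) then a₀ ++ (v :: m) ++ y :: b else (a₀ ++ [y]) ++ m ++ v :: b := by
  have e1 : ((a₀ ++ [y]) ++ m ++ v :: b) = a₀ ++ y :: (m ++ v :: b) := by simp
  have e2 : ((a₀ ++ [y]) ++ m ++ v :: b) = (a₀ ++ [y] ++ m) ++ v :: b := by simp
  have e3 : a₀.length + (m.length + 1) = a₀.length + 1 + m.length := by omega
  have l2 : (a₀ ++ [y] ++ m).length = a₀.length + 1 + m.length := by simp [e3]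
  have g1 : PySem.List.pyGetD ((a₀ ++ [y]) ++ m ++ v :: b) ((a₀.length : Nat) : Int) 0 = y := by
    rw [e1]; simp [getD_mid]
  have g2 : PySem.List.pyGetD ((a₀ ++ [y]) ++ m ++ v :: b) (((a₀.length + 1 + m.length : Nat)) : Int) 0 = v := by
    rw [show ((a₀ ++ [y]) ++ m ++ v :: b) = (a₀ ++ [y] ++ m) ++ v :: b by simp]
    simp only [PySem.List.pyGetD_natCast, ← l2, getD_mid]
  unfold istep
  rw [g1, g2]
  by_cases c : isPerfA y && decide (y < v)
  · simp only [c, if_pos]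
    simp only [PySem.List.pySetD_natCast]
    rw [show a₀ ++ [y] ++ m ++ v :: b = (a₀ ++ [y] ++ m) ++ v :: b by simp,
        ← l2, set_mid,
        show (a₀ ++ [y] ++ m) ++ y :: b = a₀ ++ y :: (m ++ y :: b) by simp, set_mid]
    simp
  · simp [c]

def innerR : List Int → Int → List Int × Int
  | [], v => ([], v)
  | y :: r, v =>
    if isPerfA y ∧ y < v then
      let p := innerR r y
      (v :: p.1, p.2)
    else
      let p := innerR r v
      (y :: p.1, p.2)

theorem innerR_length (r : List Int) (v : Int) : (innerR r v).1.length = r.length := by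
  induction r generalizing v with
  | nil => rfl
  | cons y r ih => by_cases h : isPerfA y ∧ y < v <;> simp [innerR, h, ih]

def outerR : List Int → List Int
  | [] => []
  | x :: r =>
    if isPerfA x then
      let p := innerR r x
      p.2 :: outerR p.1
    else x :: outerR r
termination_by r => r.length
decreasing_by
  all_goals simp [innerR_length]

def embedR : List Int → List Int → List Int
  | [], _ => []
  | x :: r, vs =>
    if isPerfA x then
      match vs with
      | v :: vs' => v :: embedR r vs'
      | [] => x :: embedR r []
    else x :: embedR r vs

-- ---- Part 3: the index folds equal the structural model ----

theorem innerFold (a m b : List Int) (v : Int) :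
    (PySem.List.pyRange ((a.length : Int) - 1) (-1) (-1)).foldl
      (istep (((a.length + m.length : Nat)) : Int)) (a ++ m ++ v :: b)
    = (innerR a.reverse v).1.reverse ++ m ++ (innerR a.reverse v).2 :: b := by
  induction a using List.reverseRecOn generalizing m v with
  | nil =>
      rw [PySem.List.pyRange_neg_one_eq_nil (by simp)]
      simp [innerR]
  | append_singleton a₀ y ih =>
      have hlen : (((a₀ ++ [y]).length : Nat) : Int) - 1 = ((a₀.length : Nat) : Int) := by simp
      rw [hlen, PySem.List.pyRange_neg_one_cons (by omega : (-1:Int) < ((a₀.length : Nat) : Int)), List.foldl_cons]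
      have hidx : (((a₀ ++ [y]).length + m.length : Nat) : Int) = (((a₀.length + 1 + m.length : Nat)) : Int) := by simp
      rw [hidx]
      rw [show (a₀ ++ [y]) ++ m ++ v :: b = ((a₀ ++ [y]) ++ m ++ v :: b) from rfl]
      rw [istep_at]
      by_cases c : isPerfA y && decide (y < v)
      · rw [if_pos c]
        have h2 : (((a₀.length + 1 + m.length : Nat)) : Int) = (((a₀.length + (v :: m).length : Nat)) : Int) := by simp; push_cast; ring
        rw [h2, ih (v :: m) y]
        have hc : isPerfA y ∧ y < v := by constructor <;> simp_all
        simp only [List.reverse_append, List.reverse_singleton, List.singleton_append, innerR, if_pos hc]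
        simp
      · rw [if_neg c]
        have h2 : (((a₀.length + 1 + m.length : Nat)) : Int) = (((a₀.length + (y :: m).length : Nat)) : Int) := by simp; push_cast; ring
        have hre : (a₀ ++ [y]) ++ m ++ v :: b = a₀ ++ (y :: m) ++ v :: b := by simp
        rw [h2, hre, ih (y :: m) v]
        have hc : ¬ (isPerfA y ∧ y < v) := by
          intro hh; exact c (by simp [hh.1, hh.2])
        simp only [List.reverse_append, List.reverse_singleton, List.singleton_append, innerR, if_neg hc]
        simp

theorem outerFold (a b : List Int) :
    (PySem.List.pyRange ((a.length : Int) - 1) (-1) (-1)).foldl ostep (a ++ b)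
    = (outerR a.reverse).reverse ++ b := by
  generalize hn : a.length = n
  induction n generalizing a b with
  | zero =>
      have : a = [] := List.eq_nil_of_length_eq_zero hn
      subst this
      rw [PySem.List.pyRange_neg_one_eq_nil (by simp)]
      simp [outerR]
  | succ n ih =>
      rcases (List.eq_nil_or_concat a) with rfl | ⟨a₀, x, rfl⟩
      · simp at hn
      have hn0 : a₀.length = n := by simpa using hn
      subst hn0
      simp only [List.concat_eq_append] at hn ⊢
      rw [show ((a₀.length + 1 : Nat) : Int) - 1 = ((a₀.length : Nat) : Int) by simp,
          PySem.List.pyRange_neg_one_cons (by omega : (-1:Int) < ((a₀.length : Nat) : Int)), List.foldl_cons]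
      have hget : PySem.List.pyGetD ((a₀ ++ [x]) ++ b) ((a₀.length : Nat) : Int) 0 = x := by
        rw [show (a₀ ++ [x]) ++ b = a₀ ++ x :: b by simp]
        simp [getD_mid]
      have hstep : ostep ((a₀ ++ [x]) ++ b) ((a₀.length : Nat) : Int)
          = (if isPerfA x then (innerR a₀.reverse x).1.reverse ++ (innerR a₀.reverse x).2 :: b
             else a₀ ++ x :: b) := by
        unfold ostep
        rw [hget]
        by_cases c : isPerfA x
        · rw [if_pos c, if_pos c]
          have := innerFold a₀ [] b x
          simpa using this
        · rw [if_neg c, if_neg c]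
          simp
      rw [hstep]
      by_cases c : isPerfA x
      · rw [if_pos c]
        have hlen' : ((innerR a₀.reverse x).1.reverse).length = a₀.length := by
          simp [innerR_length]
        have := ih ((innerR a₀.reverse x).1.reverse) ((innerR a₀.reverse x).2 :: b) hlen'
        rw [this]
        simp [outerR, c]
      · rw [if_neg c]
        have := ih a₀ (x :: b) rfl
        rw [this]
        simp [outerR, c]

-- ---- Part 4: the structural model sorts the perfect values ----

theorem innerR_spec (r : List Int) (v : Int) (hv : isPerfA v = true) :
    (isPerfA (innerR r v).2 = true)
    ∧ ((innerR r v).2 :: (innerR r v).1.filter isPerfA).Perm (v :: r.filter isPerfA)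
    ∧ (∀ w ∈ v :: r.filter isPerfA, (innerR r v).2 ≤ w)
    ∧ (∀ vs : List Int, vs.length = (r.filter isPerfA).length →
        embedR (innerR r v).1 vs = embedR r vs) := by
  induction r generalizing v with
  | nil =>
      refine ⟨hv, by simp [innerR], ?_, ?_⟩
      · intro w hw
        rcases List.mem_cons.mp hw with rfl | hw
        · simp [innerR]
        · simp at hw
      · intro vs _; rfl
  | cons y r ih =>
      by_cases c : isPerfA y ∧ y < v
      · obtain ⟨hP, hperm, hmin, hemb⟩ := ih y c.1
        have hr : innerR (y :: r) v = (v :: (innerR r y).1, (innerR r y).2) := by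
          simp [innerR, c]
        have hfc : (y :: r).filter isPerfA = y :: r.filter isPerfA := by
          simp [List.filter_cons, c.1]
        refine ⟨by rw [hr]; exact hP, ?_, ?_, ?_⟩
        · rw [hr, hfc]
          have h1 : ((innerR r y).2 :: (v :: (innerR r y).1).filter isPerfA)
              = (innerR r y).2 :: v :: (innerR r y).1.filter isPerfA := by
            simp [List.filter_cons, hv]
          rw [h1]
          exact (List.Perm.swap v (innerR r y).2 _).trans (List.Perm.cons v hperm)
        · rw [hr, hfc]
          intro w hw
          rcases List.mem_cons.mp hw with rfl | hw
          · exact le_of_lt (lt_of_le_of_lt (hmin y (by simp)) c.2)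
          · exact hmin w hw
        · rw [hr, hfc]
          intro vs hlen
          cases vs with
          | nil => simp at hlen
          | cons w ws =>
            have h2 : embedR (v :: (innerR r y).1) (w :: ws) = w :: embedR (innerR r y).1 ws := by
              simp [embedR, hv]
            have h3 : embedR (y :: r) (w :: ws) = w :: embedR r ws := by
              simp [embedR, c.1]
            rw [h2, h3, hemb ws (by simpa using hlen)]
      · obtain ⟨hP, hperm, hmin, hemb⟩ := ih v hv
        have hr : innerR (y :: r) v = (y :: (innerR r v).1, (innerR r v).2) := by
          simp [innerR, c]
        refine ⟨by rw [hr]; exact hP, ?_, ?_, ?_⟩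
        · rw [hr]
          by_cases hy : isPerfA y
          · rw [show ((y :: (innerR r v).1).filter isPerfA) = y :: (innerR r v).1.filter isPerfA by simp [List.filter_cons, hy],
                show ((y :: r).filter isPerfA) = y :: r.filter isPerfA by simp [List.filter_cons, hy]]
            exact ((List.Perm.swap y (innerR r v).2 _).trans (List.Perm.cons y hperm)).trans (List.Perm.swap v y _)
          · rw [show ((y :: (innerR r v).1).filter isPerfA) = (innerR r v).1.filter isPerfA by simp [List.filter_cons, hy],
                show ((y :: r).filter isPerfA) = r.filter isPerfA by simp [List.filter_cons, hy]]
            exact hperm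
        · rw [hr]
          intro w hw
          by_cases hy : isPerfA y
          · have hvy : v ≤ y := by
              rcases not_and_or.mp c with h | h
              · exact absurd hy h
              · omega
            rw [show ((y :: r).filter isPerfA) = y :: r.filter isPerfA by simp [List.filter_cons, hy]] at hw
            rcases List.mem_cons.mp hw with rfl | hw
            · exact hmin w (by simp)
            · rcases List.mem_cons.mp hw with rfl | hw
              · exact le_trans (hmin v (by simp)) hvy
              · exact hmin w (List.mem_cons_of_mem _ hw)
          · rw [show ((y :: r).filter isPerfA) = r.filter isPerfA by simp [List.filter_cons, hy]] at hw
            rcases List.mem_cons.mp hw with rfl | hw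
            · exact hmin w (by simp)
            · exact hmin w (List.mem_cons_of_mem _ hw)
        · rw [hr]
          intro vs hlen
          by_cases hy : isPerfA y
          · rw [show ((y :: r).filter isPerfA) = y :: r.filter isPerfA by simp [List.filter_cons, hy]] at hlen
            cases vs with
            | nil => simp at hlen
            | cons w ws =>
              have h2 : embedR (y :: (innerR r v).1) (w :: ws) = w :: embedR (innerR r v).1 ws := by
                simp [embedR, hy]
              have h3 : embedR (y :: r) (w :: ws) = w :: embedR r ws := by
                simp [embedR, hy]
              rw [h2, h3, hemb ws (by simpa using hlen)]
          · rw [show ((y :: r).filter isPerfA) = r.filter isPerfA by simp [List.filter_cons, hy]] at hlen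
            have h2 : embedR (y :: (innerR r v).1) vs = y :: embedR (innerR r v).1 vs := by
              simp [embedR, hy]
            have h3 : embedR (y :: r) vs = y :: embedR r vs := by
              simp [embedR, hy]
            rw [h2, h3, hemb vs hlen]

theorem outerR_spec (r : List Int) :
    outerR r = embedR r (PySem.List.sorted (r.filter isPerfA) (fun x => x) false) := by
  generalize hn : r.length = n
  induction n using Nat.strong_induction_on generalizing r with
  | _ n ih =>
    cases r with
    | nil => simp [outerR, embedR]
    | cons x r₀ =>
      by_cases c : isPerfA x
      · obtain ⟨hP, hperm, hmin, hemb⟩ := innerR_spec r₀ x c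
        have hfc : (x :: r₀).filter isPerfA = x :: r₀.filter isPerfA := by
          simp [List.filter_cons, c]
        have hkey : PySem.List.sorted ((x :: r₀).filter isPerfA) (fun z => z) false
            = (innerR r₀ x).2
              :: PySem.List.sorted ((innerR r₀ x).1.filter isPerfA) (fun z => z) false := by
          apply PySem.List.sorted_id_eq_of_perm_of_pairwise
          · refine List.Perm.trans ?_ (hfc ▸ hperm)
            exact List.Perm.cons _ (PySem.List.sorted_perm _ _ _)
          · rw [List.pairwise_cons]
            constructor
            · intro w hw
              have hw' : w ∈ (innerR r₀ x).1.filter isPerfA :=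
                (PySem.List.sorted_perm _ _ _).mem_iff.mp hw
              exact hmin w (hperm.mem_iff.mp (List.mem_cons_of_mem _ hw'))
            · exact PySem.List.sorted_pairwise _ _
        rw [hkey]
        have hlen1 : (PySem.List.sorted ((innerR r₀ x).1.filter isPerfA) (fun z => z) false).length
            = ((innerR r₀ x).1.filter isPerfA).length := (PySem.List.sorted_perm _ _ _).length_eq
        have hlen2 : ((innerR r₀ x).1.filter isPerfA).length = (r₀.filter isPerfA).length := by
          have := hperm.length_eq
          simpa using this
        have hemb' := hemb _ (hlen1.trans hlen2)
        have h3 : embedR (x :: r₀) ((innerR r₀ x).2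
              :: PySem.List.sorted ((innerR r₀ x).1.filter isPerfA) (fun z => z) false)
            = (innerR r₀ x).2 :: embedR r₀ (PySem.List.sorted ((innerR r₀ x).1.filter isPerfA) (fun z => z) false) := by
          simp [embedR, c]
        rw [h3, ← hemb']
        have hlen3 : (innerR r₀ x).1.length < n := by
          rw [← hn]; simp [innerR_length]
        have := ih _ hlen3 (innerR r₀ x).1 rfl
        rw [← this]
        simp [outerR, c]
      · have hfc : (x :: r₀).filter isPerfA = r₀.filter isPerfA := by
          simp [List.filter_cons, c]
        have h3 : ∀ vs, embedR (x :: r₀) vs = x :: embedR r₀ vs := by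
          intro vs; simp [embedR, c]
        rw [hfc, h3]
        have hlen3 : r₀.length < n := by rw [← hn]; simp
        rw [← ih _ hlen3 r₀ rfl]
        simp [outerR, c]

-- ---- Part 5: reversing the picture back, and assembling ----

theorem embedR_append (t₁ t₂ vs : List Int) :
    embedR (t₁ ++ t₂) vs
    = embedR t₁ (vs.take (t₁.filter isPerfA).length)
      ++ embedR t₂ (vs.drop (t₁.filter isPerfA).length) := by
  induction t₁ generalizing vs with
  | nil => simp [embedR]
  | cons x t₁ ih =>
    by_cases c : isPerfA x
    · rw [show ((x :: t₁).filter isPerfA).length = (t₁.filter isPerfA).length + 1 by simp [List.filter_cons, c]]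
      cases vs with
      | nil =>
        simp only [List.take_nil, List.drop_nil]
        simp only [List.cons_append, embedR, c, if_pos]
        rw [ih []]
        simp
      | cons w ws =>
        simp only [List.take_succ_cons, List.drop_succ_cons]
        simp only [List.cons_append, embedR, c, if_pos]
        rw [ih ws]
    · rw [show ((x :: t₁).filter isPerfA).length = (t₁.filter isPerfA).length by simp [List.filter_cons, c]]
      simp only [List.cons_append, embedR, c, if_neg, Bool.false_eq_true, not_false_iff]
      rw [ih vs]

theorem embedR_rev (l : List Int) (vs : List Int)
    (h : vs.length = (l.filter isPerfA).length) :
    (embedR l.reverse vs).reverse = embedR l vs.reverse := by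
  induction l generalizing vs with
  | nil => simp [embedR]
  | cons x l₀ ih =>
    have hc : (l₀.reverse.filter isPerfA).length = (l₀.filter isPerfA).length := by
      simp [List.filter_reverse]
    rw [List.reverse_cons, embedR_append, hc]
    by_cases c : isPerfA x
    · have hlen : vs.length = (l₀.filter isPerfA).length + 1 := by
        simpa [List.filter_cons, c] using h
      obtain ⟨ws, w, rfl⟩ : ∃ ws w, vs = ws ++ [w] := by
        rcases List.eq_nil_or_concat vs with rfl | ⟨ws, w, rfl⟩
        · simp at hlen
        · exact ⟨ws, w, by simp⟩
      have hws : ws.length = (l₀.filter isPerfA).length := by simpa using hlen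
      rw [show (ws ++ [w]).take (l₀.filter isPerfA).length = ws by
            rw [← hws]; simp,
          show (ws ++ [w]).drop (l₀.filter isPerfA).length = [w] by
            rw [← hws]; simp]
      rw [show embedR [x] [w] = [w] by simp [embedR, c]]
      rw [List.reverse_append]
      simp only [List.reverse_cons, List.reverse_nil, List.nil_append, List.singleton_append]
      rw [ih ws hws]
      rw [show (ws ++ [w]).reverse = w :: ws.reverse by simp]
      simp [embedR, c]
    · have hlen : vs.length = (l₀.filter isPerfA).length := by
        simpa [List.filter_cons, c] using h
      rw [show vs.take (l₀.filter isPerfA).length = vs by rw [← hlen]; simp,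
          show vs.drop (l₀.filter isPerfA).length = [] by rw [← hlen]; simp]
      rw [show embedR [x] [] = [x] by simp [embedR, c]]
      rw [List.reverse_append]
      simp only [List.reverse_cons, List.reverse_nil, List.nil_append, List.singleton_append]
      rw [ih vs hlen]
      simp [embedR, c]

theorem descSort_eq_rev (xs : List Int) :
    PySem.List.sorted xs (fun x => x) true
      = (PySem.List.sorted xs (fun x => x) false).reverse := by
  have hperm : ((PySem.List.sorted xs (fun x : Int => x) true).reverse).Perm
      (PySem.List.sorted xs (fun x : Int => x) false) :=
    ((List.reverse_perm _).trans (PySem.List.sorted_perm xs (fun x : Int => x) true)).trans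
      (PySem.List.sorted_perm xs (fun x : Int => x) false).symm
  have h := PySem.List.eq_of_perm_of_pairwise_le_of_injective (fun x : Int => x)
      (fun a b hab => hab) hperm
      (by rw [List.pairwise_reverse]; exact PySem.List.sorted_pairwise_rev xs (fun x : Int => x))
      (PySem.List.sorted_pairwise xs (fun x : Int => x))
  rw [← h]
  simp

theorem writeBack_eq_embedR (l vs : List Int) : writeBack l vs = embedR l vs := by
  induction l generalizing vs with
  | nil => rfl
  | cons x r ih =>
    cases vs <;> simp [writeBack, embedR, perfEq, ih]

-- ===== VERDICT (by name: the statement is the Claim_ definition above) =====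
theorem odd_sort_perfect_numbers_but_other_values_stay_the_same_spec : Claim_equal_odd_sort_perfect_numbers_but_other_values_stay_the_same := by
  intro list _
  show odd_sort_perfect_numbers_but_other_values_stay_the_same list = odd_sort_perfect_numbers_but_other_values_stay_the_same_alt list
  have hA : odd_sort_perfect_numbers_but_other_values_stay_the_same list = (outerR list.reverse).reverse := by
    have := outerFold list []
    simpa [odd_sort_perfect_numbers_but_other_values_stay_the_same] using this
  have hsortrev : PySem.List.sorted (list.reverse.filter isPerfA) (fun x => x) false
      = PySem.List.sorted (list.filter isPerfA) (fun x => x) false := by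
    rw [show list.reverse.filter isPerfA = (list.filter isPerfA).reverse by simp [List.filter_reverse]]
    exact PySem.List.sorted_eq_sorted_of_perm _ _ _ (fun a b hab => hab) (List.reverse_perm _)
  have hB : odd_sort_perfect_numbers_but_other_values_stay_the_same_alt list
      = embedR list (PySem.List.sorted (list.filter isPerfA) (fun x => x) false).reverse := by
    simp only [odd_sort_perfect_numbers_but_other_values_stay_the_same_alt, perfEq, writeBack_eq_embedR, descSort_eq_rev]
  rw [hA, hB, outerR_spec, hsortrev]
  apply embedR_rev
  exact (PySem.List.sorted_perm _ _ _).length_eq.trans rfl
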